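-- pv_equiv track=rewrite | github.com/Gurparkash/cp104 | labs/lab11/functions.py | find_position
-- ===== SOURCE A (Python) =====
-- def find_position(matrix):
--     """
--     -------------------------------------------------------
--     Determines the first locations [row, column] of smallest and
--     largest values in a 2D list.
--     Use: s_loc, l_loc = find_position(matrix)
--     -------------------------------------------------------
--     Parameters:
--         matrix - a 2D list of numbers (2D list)
--     Returns:
--         s_loc - a list of of the row and column location of
--             the smallest value in matrix (list of int)
--         l_loc - a list of of the row and column location of
--             the largest value in matrix (list of int)
--     -------------------------------------------------------
--     """
--     s_loc = [0, 0]
--     l_loc = [0, 0]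
--     current_lowest = matrix[0][0]
--     current_highest = matrix[0][0]
--     for i in range(len(matrix)):
--         for j in range(len(matrix[i])):
--             if matrix[i][j] < current_lowest:
--                 current_lowest = matrix[i][j]
--                 s_loc = [i , j]
--             elif matrix[i][j] > current_highest:
--                 current_highest = matrix[i][j]
--                 l_loc = [i , j]
--     return s_loc, l_loc
-- ===== SOURCE B (Python) =====
-- def find_position(matrix):
--     cells = [(v, i, j) for i, row in enumerate(matrix) for j, v in enumerate(row)]
--     sv, si, sj = min(cells, key=lambda c: c[0])
--     lv, li, lj = max(cells, key=lambda c: c[0])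
--     return [si, sj], [li, lj]
-- ===== Notes on version B (the rewrite author's own statement) =====
-- stated objective: idiomatic
-- what changed: Replaced the nested index loops with hand-maintained location/value state by a flat comprehension of (value,row,col) cells plus built-in min/max with a value key (first occurrence among ties matches A's strict-comparison updates).
import Mathlib
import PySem

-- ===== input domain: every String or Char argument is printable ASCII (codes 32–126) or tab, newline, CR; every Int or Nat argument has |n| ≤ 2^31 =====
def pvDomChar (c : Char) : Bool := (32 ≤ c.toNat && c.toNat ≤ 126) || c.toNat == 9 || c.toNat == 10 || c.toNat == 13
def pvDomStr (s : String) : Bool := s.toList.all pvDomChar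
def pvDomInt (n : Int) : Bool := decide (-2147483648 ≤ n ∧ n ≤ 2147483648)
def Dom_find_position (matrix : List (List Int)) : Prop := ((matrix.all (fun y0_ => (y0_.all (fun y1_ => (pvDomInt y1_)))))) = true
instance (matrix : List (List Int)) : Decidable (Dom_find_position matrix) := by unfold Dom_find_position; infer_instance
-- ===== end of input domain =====

-- B replaces A's nested index loops and hand-maintained min/max state by a flat
-- (value,row,col) cell list and built-in first-occurrence min/max (idiomatic; same cost).

-- ===== PORT A =====
def find_position (matrix : List (List Int)) : List Int × List Int :=
  match PySem.List.pyGet? matrix 0 with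
  | none => ([0, 0], [0, 0])          -- IndexError (matrix[0]); outside Pre_
  | some row0 =>
    match PySem.List.pyGet? row0 0 with
    | none => ([0, 0], [0, 0])        -- IndexError (matrix[0][0]); outside Pre_
    | some v0 =>
      let st := (PySem.List.pyRange 0 (matrix.length : Int) 1).foldl
        (fun st i =>
          let row := PySem.List.pyGetD matrix i []
          (PySem.List.pyRange 0 (row.length : Int) 1).foldl
            (fun st j =>
              let v := PySem.List.pyGetD row j 0
              if v < st.2.2.1 then (([i, j] : List Int), st.2.1, v, st.2.2.2)
              else if st.2.2.2 < v then (st.1, ([i, j] : List Int), st.2.2.1, v)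
              else st)
            st)
        (([0, 0] : List Int), ([0, 0] : List Int), v0, v0)
      (st.1, st.2.1)

-- ===== PORT B =====
def find_position_alt (matrix : List (List Int)) : List Int × List Int :=
  let cells := (PySem.List.enumerate matrix).flatMap
    (fun p => (PySem.List.enumerate p.2).map (fun q => (q.2, p.1, q.1)))
  match PySem.List.min? cells (fun c => c.1), PySem.List.max? cells (fun c => c.1) with
  | some s, some l => (([s.2.1, s.2.2] : List Int), ([l.2.1, l.2.2] : List Int))
  | _, _ => ([0, 0], [0, 0])          -- ValueError from min() on no cells; outside Pre_

-- ===== PRECONDITION & SPEC =====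
-- Pre_ excludes exactly the inputs on which A raises IndexError: empty matrix or empty first row.
def Pre_find_position (matrix : List (List Int)) : Prop :=
  matrix ≠ [] ∧ matrix.headI ≠ []
instance (matrix : List (List Int)) : Decidable (Pre_find_position matrix) := by
  unfold Pre_find_position; infer_instance
def pvWitness_find_position : List (List Int) := [[1, 2], [3]]

def Spec_find_position (matrix : List (List Int)) (out : List Int × List Int) : Prop := out = find_position_alt matrix
instance (matrix : List (List Int)) (out : List Int × List Int) : Decidable (Spec_find_position matrix out) := by unfold Spec_find_position; infer_instance

-- ===== CLAIM (what is proved, stated in full; the proofs are below) =====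
def Claim_equal_find_position : Prop := ∀ (matrix : List (List Int)), Dom_find_position matrix → Pre_find_position matrix → Spec_find_position matrix (find_position matrix)

-- ===== LEMMAS AND PROOFS =====

-- A's loop body as a step function on cells (v, i, j); B's min/max step functions.
def stepA (st : List Int × List Int × Int × Int) (c : Int × Int × Int) :
    List Int × List Int × Int × Int :=
  if c.1 < st.2.2.1 then (([c.2.1, c.2.2] : List Int), st.2.1, c.1, st.2.2.2)
  else if st.2.2.2 < c.1 then (st.1, ([c.2.1, c.2.2] : List Int), st.2.2.1, c.1)
  else st

def stepMin (m c : Int × Int × Int) : Int × Int × Int := if c.1 < m.1 then c else m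
def stepMax (m c : Int × Int × Int) : Int × Int × Int := if m.1 < c.1 then c else m

def cellsOf (matrix : List (List Int)) : List (Int × Int × Int) :=
  (PySem.List.enumerate matrix).flatMap
    (fun p => (PySem.List.enumerate p.2).map (fun q => (q.2, p.1, q.1)))

-- A 'for j in range(len(xs)): … j … xs[j] …' loop is the fold over enumerate xs.
theorem foldl_range_enum {α σ : Type} (f : σ → Int → α → σ) (d : α) :
    ∀ (xs pre : List α) (init : σ),
    (PySem.List.pyRange (pre.length : Int) (((pre ++ xs).length : Nat) : Int) 1).foldl
        (fun acc j => f acc j (PySem.List.pyGetD (pre ++ xs) j d)) init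
    = (PySem.List.enumerate xs (pre.length : Int)).foldl (fun acc q => f acc q.1 q.2) init := by
  intro xs
  induction xs with
  | nil =>
    intro pre init
    simp [PySem.List.pyRange_one_eq_nil, PySem.List.enumerate]
  | cons x t ih =>
    intro pre init
    have hlt : (pre.length : Int) < ((pre ++ x :: t).length : Int) := by
      simp
    rw [PySem.List.pyRange_one_cons hlt]
    simp only [List.foldl_cons]
    have hget : PySem.List.pyGetD (pre ++ x :: t) (pre.length : Int) d = x := by
      rw [PySem.List.pyGetD_eq_getElem _ d (by positivity) (by simp)]
      simp
    rw [hget]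
    have := ih (pre ++ [x]) (f init (pre.length : Int) x)
    simp only [List.append_assoc, List.cons_append, List.nil_append,
      List.length_append, List.length_cons, List.length_nil] at this ⊢
    rw [show ((pre.length : Int) + 1) = ((pre.length + 1 : Nat) : Int) by push_cast; ring] at *
    rw [show (pre.length + 1 : Nat) = (pre ++ [x]).length by simp] at *
    simpa [PySem.List.enumerate] using this

-- min()/max() with key on a nonempty list is the first-extremal fold from the head.
theorem min?_cons_foldl (c0 : Int × Int × Int) (rest : List (Int × Int × Int)) :
    PySem.List.min? (c0 :: rest) (fun c => c.1)
      = some (rest.foldl stepMin c0) := by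
  show List.foldl _ none (c0 :: rest) = _
  rw [List.foldl_cons]
  induction rest generalizing c0 with
  | nil => rfl
  | cons c t ih =>
    simp only [List.foldl_cons]
    by_cases h : c.1 < c0.1 <;> simp [stepMin, h, ih]

theorem max?_cons_foldl (c0 : Int × Int × Int) (rest : List (Int × Int × Int)) :
    PySem.List.max? (c0 :: rest) (fun c => c.1)
      = some (rest.foldl stepMax c0) := by
  show List.foldl _ none (c0 :: rest) = _
  rw [List.foldl_cons]
  induction rest generalizing c0 with
  | nil => rfl
  | cons c t ih =>
    simp only [List.foldl_cons]
    by_cases h : c0.1 < c.1 <;> simp [stepMax, h, ih]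

-- A's combined state fold is the pair of B's independent min and max folds
-- (invariant: running lowest ≤ running highest, which makes A's elif complete).
theorem mainInv : ∀ (rest : List (Int × Int × Int)) (sm lm : Int × Int × Int), sm.1 ≤ lm.1 →
    rest.foldl stepA (([sm.2.1, sm.2.2] : List Int), ([lm.2.1, lm.2.2] : List Int), sm.1, lm.1)
    = ([(rest.foldl stepMin sm).2.1, (rest.foldl stepMin sm).2.2],
       [(rest.foldl stepMax lm).2.1, (rest.foldl stepMax lm).2.2],
       (rest.foldl stepMin sm).1, (rest.foldl stepMax lm).1) := by
  intro rest
  induction rest with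
  | nil => intro sm lm h; rfl
  | cons c t ih =>
    intro sm lm h
    simp only [List.foldl_cons]
    by_cases h1 : c.1 < sm.1
    · have h2 : ¬ lm.1 < c.1 := by omega
      rw [show stepA ([sm.2.1, sm.2.2], [lm.2.1, lm.2.2], sm.1, lm.1) c
            = ([c.2.1, c.2.2], [lm.2.1, lm.2.2], c.1, lm.1) by simp [stepA, h1]]
      rw [show stepMin sm c = c by simp [stepMin, h1],
          show stepMax lm c = lm by simp [stepMax, h2]]
      exact ih c lm (by omega)
    · by_cases h2 : lm.1 < c.1
      · rw [show stepA ([sm.2.1, sm.2.2], [lm.2.1, lm.2.2], sm.1, lm.1) c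
              = ([sm.2.1, sm.2.2], [c.2.1, c.2.2], sm.1, c.1) by simp [stepA, h1, h2]]
        rw [show stepMin sm c = sm by simp [stepMin, h1],
            show stepMax lm c = c by simp [stepMax, h2]]
        exact ih sm c (by omega)
      · rw [show stepA ([sm.2.1, sm.2.2], [lm.2.1, lm.2.2], sm.1, lm.1) c
              = ([sm.2.1, sm.2.2], [lm.2.1, lm.2.2], sm.1, lm.1) by simp [stepA, h1, h2]]
        rw [show stepMin sm c = sm by simp [stepMin, h1],
            show stepMax lm c = lm by simp [stepMax, h2]]
        exact ih sm lm h

-- A's nested range/index loops are the single stepA fold over the flattened cell list.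
theorem A_loop_eq_cells (matrix : List (List Int)) (init : List Int × List Int × Int × Int) :
    (PySem.List.pyRange 0 (matrix.length : Int) 1).foldl
      (fun st i =>
        (PySem.List.pyRange 0 ((PySem.List.pyGetD matrix i []).length : Int) 1).foldl
          (fun st j =>
            if PySem.List.pyGetD (PySem.List.pyGetD matrix i []) j 0 < st.2.2.1 then
              (([i, j] : List Int), st.2.1, PySem.List.pyGetD (PySem.List.pyGetD matrix i []) j 0, st.2.2.2)
            else if st.2.2.2 < PySem.List.pyGetD (PySem.List.pyGetD matrix i []) j 0 then
              (st.1, ([i, j] : List Int), st.2.2.1, PySem.List.pyGetD (PySem.List.pyGetD matrix i []) j 0)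
            else st)
          st)
      init
    = (cellsOf matrix).foldl stepA init := by
  have houter := foldl_range_enum
    (fun (st : List Int × List Int × Int × Int) (i : Int) (row : List Int) =>
      (PySem.List.pyRange 0 (row.length : Int) 1).foldl
        (fun st j => stepA st (PySem.List.pyGetD row j 0, i, j)) st)
    ([] : List Int) matrix [] init
  simp only [List.nil_append, List.length_nil, Nat.cast_zero] at houter
  rw [show (fun (st : List Int × List Int × Int × Int) (i : Int) =>
        (PySem.List.pyRange 0 ((PySem.List.pyGetD matrix i []).length : Int) 1).foldl
          (fun st j =>
            if PySem.List.pyGetD (PySem.List.pyGetD matrix i []) j 0 < st.2.2.1 then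
              (([i, j] : List Int), st.2.1, PySem.List.pyGetD (PySem.List.pyGetD matrix i []) j 0, st.2.2.2)
            else if st.2.2.2 < PySem.List.pyGetD (PySem.List.pyGetD matrix i []) j 0 then
              (st.1, ([i, j] : List Int), st.2.2.1, PySem.List.pyGetD (PySem.List.pyGetD matrix i []) j 0)
            else st)
          st)
      = (fun st i =>
        (PySem.List.pyRange 0 ((PySem.List.pyGetD matrix i []).length : Int) 1).foldl
          (fun st j => stepA st (PySem.List.pyGetD (PySem.List.pyGetD matrix i []) j 0, i, j)) st)
      from rfl]
  rw [houter]
  unfold cellsOf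
  rw [List.foldl_flatMap]
  apply PySem.List.foldl_congr_mem
  intro acc p _
  have hinner := foldl_range_enum
    (fun (st : List Int × List Int × Int × Int) (j : Int) (v : Int) => stepA st (v, p.1, j))
    (0 : Int) p.2 [] acc
  simp only [List.nil_append, List.length_nil, Nat.cast_zero] at hinner
  rw [hinner, List.foldl_map]

-- ===== VERDICT (by name: the statement is the Claim_ definition above) =====
theorem find_position_spec : Claim_equal_find_position := by
  intro matrix _ hpre
  obtain ⟨h1, h2⟩ := hpre
  rcases matrix with _ | ⟨r0, rs⟩
  · exact absurd rfl h1
  rcases r0 with _ | ⟨v0, vs⟩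
  · exact absurd rfl h2
  show find_position ((v0 :: vs) :: rs) = find_position_alt ((v0 :: vs) :: rs)
  have hcells : cellsOf ((v0 :: vs) :: rs)
      = (v0, (0 : Int), (0 : Int)) ::
        ((PySem.List.enumerate vs 1).map (fun q => (q.2, (0 : Int), q.1)) ++
         (PySem.List.enumerate rs 1).flatMap
           (fun p => (PySem.List.enumerate p.2).map (fun q => (q.2, p.1, q.1)))) := by
    simp [cellsOf, PySem.List.enumerate]
  have e1 : PySem.List.pyGet? ((v0 :: vs) :: rs) 0 = some (v0 :: vs) := by simp [pysem]
  have e2 : PySem.List.pyGet? (v0 :: vs) 0 = some v0 := by simp [pysem]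
  have hBc : (PySem.List.enumerate ((v0 :: vs) :: rs)).flatMap
      (fun p => (PySem.List.enumerate p.2).map (fun q => (q.2, p.1, q.1)))
      = cellsOf ((v0 :: vs) :: rs) := rfl
  have hm := mainInv
    ((PySem.List.enumerate vs 1).map (fun q => (q.2, (0 : Int), q.1)) ++
      (PySem.List.enumerate rs 1).flatMap
        (fun p => (PySem.List.enumerate p.2).map (fun q => (q.2, p.1, q.1))))
    (v0, (0 : Int), (0 : Int)) (v0, (0 : Int), (0 : Int)) le_rfl
  simp only [] at hm
  simp only [find_position, find_position_alt, e1, e2, hBc, A_loop_eq_cells, hcells,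
    List.foldl_cons, min?_cons_foldl, max?_cons_foldl,
    show stepA ([0, 0], [0, 0], v0, v0) (v0, (0 : Int), (0 : Int)) = ([0, 0], [0, 0], v0, v0) by
      simp [stepA],
    hm]
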